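-- pv_equiv track=rewrite | github.com/chenym97/Hybrid_Fractals | SG3.py | isInvalidCode
-- ===== SOURCE A (Python) =====
-- def isBoundary(code):
--     if len(code) == 1:
--         return True
--     if code[-1] != code[-2]:
--         return False
--     else:
--         return isBoundary(code[:-1])
--
-- def isInvalidCode(code):
--     if isBoundary(code[1:]):
--         return False
--     if code[-1] < code[-2]:
--         return True
--     if code[-1] > code[-2]:
--         return False
--     return isInvalidCode(code[:-1])
-- ===== SOURCE B (Python) =====
-- def isInvalidCode(code):
--     j = len(code) - 2
--     while j >= 1:
--         if code[j] != code[j + 1]: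
--             return code[j + 1] < code[j]
--         j -= 1
--     return False
-- ===== Notes on version B (the rewrite author's own statement) =====
-- stated objective: faster
-- what changed: Replaced the recursive peel-off with quadratic list slicing and the uniform-suffix re-check by a single right-to-left index scan that finds the rightmost differing adjacent pair at positions >= 1.
import Mathlib
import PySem

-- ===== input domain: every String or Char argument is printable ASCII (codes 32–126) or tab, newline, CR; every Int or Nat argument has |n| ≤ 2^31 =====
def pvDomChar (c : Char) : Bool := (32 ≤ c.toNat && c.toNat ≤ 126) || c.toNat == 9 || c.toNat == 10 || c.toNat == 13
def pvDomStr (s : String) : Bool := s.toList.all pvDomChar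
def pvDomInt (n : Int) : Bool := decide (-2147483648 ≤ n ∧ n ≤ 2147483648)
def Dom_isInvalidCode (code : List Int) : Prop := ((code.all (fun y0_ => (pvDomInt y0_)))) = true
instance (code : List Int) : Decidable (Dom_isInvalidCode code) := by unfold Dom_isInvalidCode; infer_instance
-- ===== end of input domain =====

-- B replaces A's quadratic slice-and-recurse with one O(n) right-to-left scan for the
-- rightmost differing adjacent pair (objective: faster, asymptotic).


-- ===== PORT A =====
-- helper isBoundary; the `| _, _ => false` arm is where Python raises IndexError (empty list)
def isBoundaryA (code : List Int) : Bool :=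
  if code.length == 1 then true
  else
    match h1 : PySem.List.pyGet? code (-1), h2 : PySem.List.pyGet? code (-2) with
    | some a, some b =>
        if a != b then false
        else isBoundaryA (PySem.List.slice code none (some (-1)))
    | _, _ => false
termination_by code.length
decreasing_by
  have hlen : 2 ≤ code.length := by
    by_contra hc
    have : PySem.List.pyGet? code (-2) = none := by
      rw [PySem.List.pyGet?_eq_none_iff]
      simp [PySem.Raise.InRange]; omega
    simp [this] at h2
  simp [PySem.List.slice_to_neg_one]
  omega

def isInvalidCode (code : List Int) : Bool :=
  if isBoundaryA (PySem.List.slice code (some 1) none) then false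
  else
    match h1 : PySem.List.pyGet? code (-1), h2 : PySem.List.pyGet? code (-2) with
    | some a, some b =>
        if a < b then true
        else if a > b then false
        else isInvalidCode (PySem.List.slice code none (some (-1)))
    | _, _ => false
termination_by code.length
decreasing_by
  have hlen : 2 ≤ code.length := by
    by_contra hc
    have : PySem.List.pyGet? code (-2) = none := by
      rw [PySem.List.pyGet?_eq_none_iff]
      simp [PySem.Raise.InRange]; omega
    simp [this] at h2
  simp [PySem.List.slice_to_neg_one]
  omega

-- ===== PORT B =====
-- the while loop of Source B, counting the index j down; j = 0 leaves the loop
def altLoop (code : List Int) : Nat → Bool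
  | 0 => false
  | j + 1 =>
      if code.getD (j + 1) 0 ≠ code.getD (j + 2) 0 then
        decide (code.getD (j + 2) 0 < code.getD (j + 1) 0)
      else altLoop code j

def isInvalidCode_alt (code : List Int) : Bool :=
  altLoop code (code.length - 2)

-- ===== PRECONDITION & SPEC =====
-- A raises IndexError on lists of length < 2 (negative indexing on an empty slice)
def Pre_isInvalidCode (code : List Int) : Prop := 2 ≤ code.length
instance (code : List Int) : Decidable (Pre_isInvalidCode code) := by unfold Pre_isInvalidCode; infer_instance
def pvWitness_isInvalidCode : List Int := [0, 1]

def Spec_isInvalidCode (code : List Int) (out : Bool) : Prop := out = isInvalidCode_alt code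
instance (code : List Int) (out : Bool) : Decidable (Spec_isInvalidCode code out) := by unfold Spec_isInvalidCode; infer_instance

-- ===== CLAIM (what is proved, stated in full; the proofs are below) =====
def Claim_equal_isInvalidCode : Prop := ∀ (code : List Int), Dom_isInvalidCode code → Pre_isInvalidCode code → Spec_isInvalidCode code (isInvalidCode code)

-- ===== LEMMAS AND PROOFS =====

-- isBoundary is the "all adjacent pairs equal" test
theorem isBoundaryA_iff : ∀ (n : Nat) (l : List Int), l.length = n → l ≠ [] →
    (isBoundaryA l = true ↔ ∀ i : Nat, i + 1 < l.length → l.getD i 0 = l.getD (i + 1) 0) := by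
  intro n
  induction n using Nat.strong_induction_on with
  | _ n ih =>
    intro l hn hne
    have hlen : 1 ≤ l.length := List.length_pos_iff.mpr hne
    rw [isBoundaryA]
    by_cases h1 : l.length = 1
    · simp [h1]
    · have h2 : 2 ≤ l.length := by omega
      have e1 : PySem.List.pyGet? l (-1) = some l[l.length - 1] := by
        rw [PySem.List.pyGet?_neg_ofNat l 1 (by omega) (by omega)]
        simp [List.getElem?_eq_getElem (by omega : l.length - 1 < l.length)]
      have e2 : PySem.List.pyGet? l (-2) = some l[l.length - 2] := by
        rw [PySem.List.pyGet?_neg_ofNat l 2 (by omega) (by omega)]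
        simp [List.getElem?_eq_getElem (by omega : l.length - 2 < l.length)]
      rw [if_neg (by simpa using h1)]
      rw [e1, e2]
      simp only [bne_iff_ne, ne_eq, ite_not]
      by_cases heq : l[l.length - 1] = l[l.length - 2]
      · rw [if_pos heq]
        rw [PySem.List.slice_to_neg_one]
        have hrec := ih (l.length - 1) (by omega) l.dropLast (by simp) (by
          intro hc; apply_fun List.length at hc; simp at hc; omega)
        rw [hrec]
        constructor
        · intro hall i hi
          by_cases hi2 : i + 1 < l.length - 1
          · have := hall i (by simpa using hi2)
            rw [List.getD_eq_getElem?_getD, List.getElem?_dropLast, List.getD_eq_getElem?_getD, List.getElem?_dropLast] at this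
            rw [List.getD_eq_getElem?_getD, List.getD_eq_getElem?_getD]
            simpa [show i < l.length - 1 by omega, hi2] using this
          · -- i + 1 = l.length - 1, i.e. last pair
            have hi3 : i = l.length - 2 := by omega
            subst hi3
            rw [show l.length - 2 + 1 = l.length - 1 from by omega]
            rw [List.getD_eq_getElem l 0 (by omega), List.getD_eq_getElem l 0 (by omega)]
            exact heq.symm
        · intro hall i hi
          simp only [List.length_dropLast] at hi
          rw [List.getD_eq_getElem?_getD, List.getElem?_dropLast, List.getD_eq_getElem?_getD, List.getElem?_dropLast]
          have := hall i (by omega)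
          rw [List.getD_eq_getElem?_getD, List.getD_eq_getElem?_getD] at this
          simpa [show i < l.length - 1 by omega, hi] using this
      · rw [if_neg heq]
        simp only [Bool.false_eq_true, false_iff, not_forall]
        refine ⟨l.length - 2, by omega, ?_⟩
        rw [show l.length - 2 + 1 = l.length - 1 from by omega]
        rw [List.getD_eq_getElem l 0 (by omega), List.getD_eq_getElem l 0 (by omega)]
        exact fun h => heq h.symm


-- the scan returns false when every inspected pair is equal
theorem altLoop_false : ∀ (code : List Int) (j : Nat),
    (∀ i : Nat, 1 ≤ i → i ≤ j → code.getD i 0 = code.getD (i + 1) 0) → altLoop code j = false := by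
  intro code j
  induction j with
  | zero => intro _; rfl
  | succ j ih =>
      intro h
      rw [altLoop]
      rw [if_neg (by simpa using h (j + 1) (by omega) (by omega))]
      exact ih (fun i h1 h2 => h i h1 (by omega))

-- the scan only looks at indices ≤ j + 1, so dropLast is invisible to it
theorem altLoop_dropLast : ∀ (code : List Int) (j : Nat), j + 1 < code.length - 1 →
    altLoop code.dropLast j = altLoop code j := by
  intro code j
  induction j with
  | zero => intro _; rfl
  | succ j ih =>
      intro h
      have hg : ∀ k : Nat, k < code.length - 1 → code.dropLast.getD k 0 = code.getD k 0 := by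
        intro k hk
        rw [List.getD_eq_getElem?_getD, List.getD_eq_getElem?_getD, List.getElem?_dropLast]
        simp [hk]
      rw [altLoop, altLoop, hg (j + 1) (by omega), hg (j + 2) (by omega), ih (by omega)]

theorem main_equiv : ∀ (n : Nat) (code : List Int), code.length = n → 2 ≤ code.length →
    isInvalidCode code = altLoop code (code.length - 2) := by
  intro n
  induction n using Nat.strong_induction_on with
  | _ n ih =>
    intro code hn h2
    rw [isInvalidCode, PySem.List.slice_from_one]
    have htne : code.tail ≠ [] := by
      intro hc; apply_fun List.length at hc; simp at hc; omega
    have htl : code.tail.length = code.length - 1 := by simp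
    have hbiff := isBoundaryA_iff code.tail.length code.tail rfl htne
    by_cases hb : isBoundaryA code.tail = true
    · rw [if_pos hb]
      symm
      apply altLoop_false
      intro i hi1 hij
      have := (hbiff.mp hb) (i - 1) (by omega)
      rw [List.getD_eq_getElem?_getD, List.getD_eq_getElem?_getD, List.getElem?_tail, List.getElem?_tail] at this
      rw [List.getD_eq_getElem?_getD, List.getD_eq_getElem?_getD]
      have e1 : i - 1 + 1 = i := by omega
      rw [e1] at this
      exact this
    · rw [if_neg hb]
      -- tail not uniform ⇒ tail has length ≥ 2 ⇒ code.length ≥ 3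
      have h3 : 3 ≤ code.length := by
        by_contra hc
        have ht1 : code.tail.length = 1 := by omega
        apply hb
        rw [isBoundaryA, if_pos (by simp [ht1])]
      have e1 : PySem.List.pyGet? code (-1) = some code[code.length - 1] := by
        rw [PySem.List.pyGet?_neg_ofNat code 1 (by omega) (by omega)]
        simp [List.getElem?_eq_getElem (by omega : code.length - 1 < code.length)]
      have e2 : PySem.List.pyGet? code (-2) = some code[code.length - 2] := by
        rw [PySem.List.pyGet?_neg_ofNat code 2 (by omega) (by omega)]
        simp [List.getElem?_eq_getElem (by omega : code.length - 2 < code.length)]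
      rw [e1, e2]
      show (if code[code.length - 1] < code[code.length - 2] then true
            else if code[code.length - 1] > code[code.length - 2] then false
            else isInvalidCode (PySem.List.slice code none (some (-1)))) =
          altLoop code (code.length - 2)
      -- RHS: unfold one step of altLoop at j = code.length - 2 = (code.length - 3) + 1
      have hj : code.length - 2 = (code.length - 3) + 1 := by omega
      conv_rhs => rw [hj]
      rw [altLoop]
      have ga : code.getD (code.length - 3 + 1) 0 = code[code.length - 2] := by
        rw [show code.length - 3 + 1 = code.length - 2 from by omega]
        exact List.getD_eq_getElem code 0 (by omega)
      have gb : code.getD (code.length - 3 + 2) 0 = code[code.length - 1] := by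
        rw [show code.length - 3 + 2 = code.length - 1 from by omega]
        exact List.getD_eq_getElem code 0 (by omega)
      rw [ga, gb]
      by_cases hlt : code[code.length - 1] < code[code.length - 2]
      · rw [if_pos hlt, if_pos (by omega), decide_eq_true hlt]
      · by_cases hgt : code[code.length - 1] > code[code.length - 2]
        · rw [if_neg hlt, if_pos hgt, if_pos (by omega)]
          simp [not_lt.mpr (le_of_lt hgt)]
        · have heq : code[code.length - 2] = code[code.length - 1] := by omega
          rw [if_neg hlt, if_neg hgt, if_neg (by simp [heq])]
          rw [PySem.List.slice_to_neg_one]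
          have hdl : code.dropLast.length = code.length - 1 := by simp
          rw [ih (code.length - 1) (by omega) code.dropLast (by omega) (by omega)]
          rw [hdl, show code.length - 1 - 2 = code.length - 3 from by omega]
          exact altLoop_dropLast code (code.length - 3) (by omega)

-- ===== VERDICT (by name: the statement is the Claim_ definition above) =====
theorem isInvalidCode_spec : Claim_equal_isInvalidCode := by
  intro code _ hpre
  exact main_equiv code.length code rfl hpre
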